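-- pv_equiv track=rewrite | github.com/sergiokv13/advent-of-code | day_16/day_16.py | filter_invalid_nearby
-- ===== SOURCE A (Python) =====
-- def filter_invalid_nearby(rules, nearby):
--   valid_nearby = []
--   main_set = set()
--   for rule in rules.values():
--     main_set |= rule
--
--   for n in nearby:
--     valid_n = True
--     for v in n:
--       if v not in main_set:
--         valid_n = False
--
--     if valid_n:
--       valid_nearby.append(n)
--
--   return valid_nearby
-- ===== SOURCE B (Python) =====
-- def filter_invalid_nearby(rules, nearby):
--   rule_sets = list(rules.values())
--   return [n for n in nearby
--           if all(any(v in rule for rule in rule_sets) for v in n)]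
-- ===== Notes on version B (the rewrite author's own statement) =====
-- stated objective: simpler
-- what changed: B builds no union set: it filters with a comprehension, checking each ticket value directly against each rule's set, instead of precomputing the union of all rules and looping with a mutable validity flag.
import Mathlib
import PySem

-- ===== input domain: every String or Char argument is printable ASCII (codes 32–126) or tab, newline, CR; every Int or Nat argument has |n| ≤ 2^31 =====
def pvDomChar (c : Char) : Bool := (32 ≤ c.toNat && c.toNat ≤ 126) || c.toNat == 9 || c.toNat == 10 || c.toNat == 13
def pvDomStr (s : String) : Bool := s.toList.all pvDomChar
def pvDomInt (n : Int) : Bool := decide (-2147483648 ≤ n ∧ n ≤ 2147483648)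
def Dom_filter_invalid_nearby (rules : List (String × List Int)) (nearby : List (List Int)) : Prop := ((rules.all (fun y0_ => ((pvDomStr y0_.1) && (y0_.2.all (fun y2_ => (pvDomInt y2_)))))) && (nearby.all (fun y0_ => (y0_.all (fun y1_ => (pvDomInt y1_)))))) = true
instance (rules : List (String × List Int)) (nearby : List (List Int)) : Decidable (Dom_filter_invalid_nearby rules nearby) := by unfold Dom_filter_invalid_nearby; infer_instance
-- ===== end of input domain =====

-- B drops A's precomputed union set, filtering tickets by checking each value against each rule directly (objective: simpler).

-- ===== PORT A =====
def filter_invalid_nearby (rules : List (String × List Int)) (nearby : List (List Int)) : List (List Int) :=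
  -- main_set = set(); for rule in rules.values(): main_set |= rule
  let main_set : PySem.Set Int :=
    rules.foldl (fun s rule => PySem.Set.union s rule.2) PySem.Set.empty
  -- for n in nearby: valid_n = True; for v in n: if v not in main_set: valid_n = False; if valid_n: append
  nearby.foldl (fun valid_nearby n =>
    let valid_n := n.foldl (fun valid_n v =>
      if ¬ PySem.Set.contains main_set v then false else valid_n) true
    if valid_n then valid_nearby ++ [n] else valid_nearby) []

-- ===== PORT B =====
def filter_invalid_nearby_alt (rules : List (String × List Int)) (nearby : List (List Int)) : List (List Int) :=
  nearby.filter (fun n => n.all (fun v => rules.any (fun rule => rule.2.contains v)))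

-- ===== PRECONDITION & SPEC =====
def Spec_filter_invalid_nearby (rules : List (String × List Int)) (nearby : List (List Int)) (out : List (List Int)) : Prop := out = filter_invalid_nearby_alt rules nearby
instance (rules : List (String × List Int)) (nearby : List (List Int)) (out : List (List Int)) : Decidable (Spec_filter_invalid_nearby rules nearby out) := by unfold Spec_filter_invalid_nearby; infer_instance

-- ===== CLAIM (what is proved, stated in full; the proofs are below) =====
def Claim_equal_filter_invalid_nearby : Prop := ∀ (rules : List (String × List Int)) (nearby : List (List Int)), Dom_filter_invalid_nearby rules nearby → Spec_filter_invalid_nearby rules nearby (filter_invalid_nearby rules nearby)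

-- ===== LEMMAS AND PROOFS =====

-- membership in the folded union = some rule contains the value
theorem mem_fold_union (rules : List (String × List Int)) (s : PySem.Set Int) (v : Int) :
    v ∈ rules.foldl (fun s rule => PySem.Set.union s rule.2) s ↔
      v ∈ s ∨ ∃ r ∈ rules, v ∈ r.2 := by
  induction rules generalizing s with
  | nil => simp
  | cons r rs ih =>
    simp [List.foldl_cons, ih, PySem.Set.mem_union]
    tauto

-- the inner flag-loop equals List.all over the membership test
theorem inner_flag (s : PySem.Set Int) (n : List Int) (b : Bool) :
    n.foldl (fun valid_n v => if ¬ PySem.Set.contains s v then false else valid_n) b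
      = (b && n.all (fun v => PySem.Set.contains s v)) := by
  induction n generalizing b with
  | nil => simp
  | cons v vs ih =>
    rw [List.foldl_cons, List.all_cons]
    by_cases h : PySem.Set.contains s v = true
    · rw [if_neg (fun hc => hc h), ih, h, Bool.true_and]
    · have hf : PySem.Set.contains s v = false := by simpa using h
      rw [if_pos h, ih, hf]
      simp

-- the outer append-loop is a filter
theorem outer_filter (p : List Int → Bool) (nearby acc : List (List Int)) :
    nearby.foldl (fun valid_nearby n => if p n then valid_nearby ++ [n] else valid_nearby) acc
      = acc ++ nearby.filter p := by
  induction nearby generalizing acc with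
  | nil => simp
  | cons n ns ih =>
    by_cases h : p n <;> simp [List.foldl_cons, h, ih]

-- ===== VERDICT (by name: the statement is the Claim_ definition above) =====
theorem filter_invalid_nearby_spec : Claim_equal_filter_invalid_nearby := by
  intro rules nearby _
  unfold Spec_filter_invalid_nearby filter_invalid_nearby filter_invalid_nearby_alt
  have hpt : ∀ v : Int,
      PySem.Set.contains (rules.foldl (fun s rule => PySem.Set.union s rule.2) PySem.Set.empty) v
        = rules.any (fun rule => rule.2.contains v) := by
    intro v
    have h1 : PySem.Set.contains (rules.foldl (fun s rule => PySem.Set.union s rule.2) PySem.Set.empty) v = true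
        ↔ rules.any (fun rule => rule.2.contains v) = true := by
      rw [PySem.Set.contains_iff]
      simp [mem_fold_union, PySem.Set.empty, List.any_eq_true]
    exact Bool.coe_iff_coe.mp h1
  rw [outer_filter]
  simp only [List.nil_append]
  apply List.filter_congr
  intro n _
  rw [inner_flag, Bool.true_and]
  simp only [hpt]
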